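-- pv_equiv track=rewrite | github.com/aformen9/GymBot | SisExpGymBot/python_bot/routine_builder.py | _calcular_volumen
-- ===== SOURCE A (Python) =====
-- from typing import List, Dict, Tuple
--
-- def _calcular_volumen(rutina: List) -> Dict[str, int]:
--     """Calcula sets totales por grupo muscular."""
--     volumen = {"pecho": 0, "espalda": 0, "piernas": 0, "hombros": 0, "core": 0}
--
--     for dia_info in rutina:
--         ejercicios = dia_info[1]
--         for grupo, _ in ejercicios:
--             if grupo in volumen:
--                 volumen[grupo] += 1
--
--     return volumen
-- ===== SOURCE B (Python) =====
-- def _calcular_volumen(rutina):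
--     """Calcula sets totales por grupo muscular."""
--     return {
--         g: sum(grupo == g for dia_info in rutina for grupo, _ in dia_info[1])
--         for g in ("pecho", "espalda", "piernas", "hombros", "core")
--     }
-- ===== Notes on version B (the rewrite author's own statement) =====
-- stated objective: simpler
-- what changed: Inverts the traversal: instead of one data-major pass that updates a pre-seeded dict behind a membership guard, B is key-major: for each of the five fixed groups it makes its own pass over the routine summing equality indicators, so no mutable dict, no guard, and no increment exist.
import Mathlib
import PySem

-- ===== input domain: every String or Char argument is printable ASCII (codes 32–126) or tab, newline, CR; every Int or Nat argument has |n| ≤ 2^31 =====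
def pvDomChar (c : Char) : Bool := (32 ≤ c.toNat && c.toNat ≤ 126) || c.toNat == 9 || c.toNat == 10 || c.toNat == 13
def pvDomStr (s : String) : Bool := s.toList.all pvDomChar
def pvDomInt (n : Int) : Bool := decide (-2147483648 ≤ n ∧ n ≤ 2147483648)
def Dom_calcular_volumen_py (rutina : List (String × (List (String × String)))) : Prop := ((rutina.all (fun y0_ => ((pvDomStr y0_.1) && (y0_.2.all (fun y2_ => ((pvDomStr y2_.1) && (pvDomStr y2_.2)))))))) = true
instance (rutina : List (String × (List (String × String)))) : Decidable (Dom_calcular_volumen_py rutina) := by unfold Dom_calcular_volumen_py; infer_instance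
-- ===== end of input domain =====

-- B inverts the traversal: key-major (one counting pass over the routine per fixed group) instead of A's data-major dict updates behind a membership guard; simpler, same order of cost.

-- ===== PORT A =====
def calcular_volumen_py (rutina : List (String × (List (String × String)))) : List (String × Int) :=
  let volumen : PySem.Dict String Int :=
    PySem.Dict.ofList [("pecho", 0), ("espalda", 0), ("piernas", 0), ("hombros", 0), ("core", 0)]
  let volumen := rutina.foldl (fun vol dia_info =>
    let ejercicios := dia_info.2
    ejercicios.foldl (fun vol p =>
      if vol.contains p.1 then vol.insert p.1 (vol.getD p.1 0 + 1) else vol) vol) volumen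
  volumen.items

-- ===== PORT B =====
-- key-major: for each fixed group g, sum equality indicators over the whole routine
def calcular_volumen_py_alt (rutina : List (String × (List (String × String)))) : List (String × Int) :=
  ["pecho", "espalda", "piernas", "hombros", "core"].map (fun g =>
    (g, rutina.foldl (fun acc dia_info =>
          dia_info.2.foldl (fun acc p => acc + (if p.1 == g then 1 else 0)) acc) (0 : Int)))

-- ===== PRECONDITION & SPEC =====
def Spec_calcular_volumen_py (rutina : List (String × (List (String × String)))) (out : List (String × Int)) : Prop := out = calcular_volumen_py_alt rutina
instance (rutina : List (String × (List (String × String)))) (out : List (String × Int)) : Decidable (Spec_calcular_volumen_py rutina out) := by unfold Spec_calcular_volumen_py; infer_instance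

-- ===== CLAIM =====
def Claim_equal_calcular_volumen_py : Prop := ∀ (rutina : List (String × (List (String × String)))), Dom_calcular_volumen_py rutina → Spec_calcular_volumen_py rutina (calcular_volumen_py rutina)

-- ===== LEMMAS AND PROOFS =====

-- A's loop step, on a single muscle-group label
def pvStep (vol : PySem.Dict String Int) (g : String) : PySem.Dict String Int :=
  if vol.contains g then vol.insert g (vol.getD g 0 + 1) else vol

theorem pvStep_keys (vol : PySem.Dict String Int) (g : String) :
    (pvStep vol g).keys = vol.keys := by
  unfold pvStep
  split_ifs with h
  · exact PySem.Dict.keys_insert_of_contains _ _ h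
  · rfl

theorem pvFold_keys (ls : List String) (vol : PySem.Dict String Int) :
    (ls.foldl pvStep vol).keys = vol.keys := by
  induction ls generalizing vol with
  | nil => rfl
  | cons g ls ih => rw [List.foldl_cons, ih, pvStep_keys]

theorem pvStep_contains (vol : PySem.Dict String Int) (g k : String) :
    (pvStep vol g).contains k = vol.contains k := by
  unfold pvStep
  split_ifs with h
  · rw [PySem.Dict.contains_insert]
    by_cases hk : k = g
    · simp [hk, h]
    · simp [hk]
  · rfl

theorem pvFold_getD (ls : List String) (vol : PySem.Dict String Int) (k : String)
    (hk : vol.contains k = true) :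
    (ls.foldl pvStep vol).getD k 0 = vol.getD k 0 + ls.count k := by
  induction ls generalizing vol with
  | nil => simp
  | cons g ls ih =>
    rw [List.foldl_cons, ih (pvStep vol g) (by rw [pvStep_contains]; exact hk)]
    have hstep : (pvStep vol g).getD k 0 = vol.getD k 0 + (if k = g then 1 else 0) := by
      unfold pvStep
      split_ifs with h hkg hkg
      · subst hkg; rw [PySem.Dict.getD_insert]; simp
      · rw [PySem.Dict.getD_insert]; simp [hkg]
      · exact absurd (hkg ▸ hk) (by simp [h])
      · simp
    rw [hstep, List.count_cons]
    by_cases he : k = g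
    · subst he
      simp only [beq_self_eq_true, if_true]
      push_cast
      ring
    · have hbe : (g == k) = false := beq_eq_false_iff_ne.mpr (Ne.symm he)
      simp only [if_neg he, hbe, Bool.false_eq_true, if_false]
      push_cast
      ring

theorem pvFold_nodup (ls : List String) (vol : PySem.Dict String Int)
    (h : vol.keys.Nodup) : (ls.foldl pvStep vol).keys.Nodup := by
  rw [pvFold_keys]; exact h

-- inner fold of B: adds the count of g among the first components
theorem pvAlt_inner (g : String) (l : List (String × String)) (a : Int) :
    l.foldl (fun acc p => acc + (if p.1 == g then 1 else 0)) a
      = a + ((l.map (·.1)).count g : Int) := by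
  induction l generalizing a with
  | nil => simp
  | cons p t iht =>
    rw [List.foldl_cons, iht, List.map_cons, List.count_cons]
    by_cases hp : p.1 = g
    · simp [hp]; push_cast; ring
    · have : (p.1 == g) = false := beq_eq_false_iff_ne.mpr hp
      simp [this]

-- B's per-key double fold equals the count of g among the flattened labels
theorem pvAlt_count (rutina : List (String × (List (String × String)))) (g : String) (a : Int) :
    rutina.foldl (fun acc dia_info =>
        dia_info.2.foldl (fun acc p => acc + (if p.1 == g then 1 else 0)) acc) a
      = a + ((rutina.flatMap (fun dia_info => dia_info.2.map (·.1))).count g : Int) := by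
  induction rutina generalizing a with
  | nil => simp
  | cons d rest ih =>
    rw [List.foldl_cons, ih, pvAlt_inner, List.flatMap_cons, List.count_append]
    push_cast; ring

-- ===== VERDICT =====
theorem calcular_volumen_py_spec : Claim_equal_calcular_volumen_py := by
  intro rutina _
  unfold Spec_calcular_volumen_py calcular_volumen_py calcular_volumen_py_alt
  set d0 : PySem.Dict String Int :=
    PySem.Dict.ofList [("pecho", 0), ("espalda", 0), ("piernas", 0), ("hombros", 0), ("core", 0)] with hd0
  set labels : List String := rutina.flatMap (fun dia_info => dia_info.2.map (·.1)) with hlabels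
  have hfold : (rutina.foldl (fun vol dia_info =>
      (dia_info.2).foldl (fun vol p =>
        if vol.contains p.1 then vol.insert p.1 (vol.getD p.1 0 + 1) else vol) vol) d0)
      = labels.foldl pvStep d0 := by
    rw [hlabels, List.foldl_flatMap]
    congr 1
    funext vol dia
    rw [List.foldl_map]
    rfl
  simp only [hfold]
  have hnd : d0.keys.Nodup := by rw [hd0]; decide
  rw [PySem.Dict.items_eq_map_keys _ (pvFold_nodup labels d0 hnd) 0, pvFold_keys]
  have hkeys : d0.keys = ["pecho", "espalda", "piernas", "hombros", "core"] := by rw [hd0]; decide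
  rw [hkeys]
  simp only [List.map_cons, List.map_nil]
  rw [pvFold_getD labels d0 "pecho" (by rw [hd0]; decide),
      pvFold_getD labels d0 "espalda" (by rw [hd0]; decide),
      pvFold_getD labels d0 "piernas" (by rw [hd0]; decide),
      pvFold_getD labels d0 "hombros" (by rw [hd0]; decide),
      pvFold_getD labels d0 "core" (by rw [hd0]; decide)]
  have e1 : d0.getD "pecho" 0 = 0 := by rw [hd0]; decide
  have e2 : d0.getD "espalda" 0 = 0 := by rw [hd0]; decide
  have e3 : d0.getD "piernas" 0 = 0 := by rw [hd0]; decide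
  have e4 : d0.getD "hombros" 0 = 0 := by rw [hd0]; decide
  have e5 : d0.getD "core" 0 = 0 := by rw [hd0]; decide
  rw [pvAlt_count rutina "pecho" 0, pvAlt_count rutina "espalda" 0, pvAlt_count rutina "piernas" 0,
      pvAlt_count rutina "hombros" 0, pvAlt_count rutina "core" 0, ← hlabels]
  simp [e1, e2, e3, e4, e5]
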